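-- pv_equiv track=rewrite | github.com/BerVol57/ATI | Lab 3/Huffman.py | huffman_dict_to_bits
-- ===== SOURCE A (Python) =====
-- def huffman_dict_to_bits(huffman_codes):
--     bitstream = []
--     current_byte = 0
--     bit_count = 0
--
--     for symbol, code in huffman_codes.items():
--         bitstream.append(bin(symbol)[2:].zfill(8))
--
--         code_length = len(code)
--         bitstream.append(bin(code_length)[2:].zfill(8))
--
--         for bit in code:
--             current_byte = (current_byte << 1) | int(bit)
--             bit_count += 1
--             if bit_count == 8:
--                 bitstream.append(bin(current_byte)[2:].zfill(8))
--                 current_byte = 0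
--                 bit_count = 0
--
--         if bit_count > 0:
--             current_byte <<= (8 - bit_count)
--             bitstream.append(bin(current_byte)[2:].zfill(8))
--             current_byte = 0
--             bit_count = 0
--
--     return bitstream
-- ===== SOURCE B (Python) =====
-- def huffman_dict_to_bits(huffman_codes):
--     bitstream = []
--     for symbol, code in huffman_codes.items():
--         bitstream.append(bin(symbol)[2:].zfill(8))
--         bitstream.append(bin(len(code))[2:].zfill(8))
--         padded = code + '0' * (-len(code) % 8)
--         for i in range(0, len(padded), 8):
--             byte = 0
--             for bit in padded[i:i+8]:
--                 byte = (byte << 1) | int(bit)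
--             bitstream.append(bin(byte)[2:].zfill(8))
--     return bitstream
-- ===== Notes on version B (the rewrite author's own statement) =====
-- stated objective: simpler
-- what changed: Replaces A's cross-character byte-accumulator state machine (current_byte/bit_count threaded through the whole code with an 8-bit overflow branch and an end-of-code flush) by stateless per-chunk processing: each code is right-padded with '0' to a multiple of 8 and each 8-character slice is folded into its byte independently.
import Mathlib
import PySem

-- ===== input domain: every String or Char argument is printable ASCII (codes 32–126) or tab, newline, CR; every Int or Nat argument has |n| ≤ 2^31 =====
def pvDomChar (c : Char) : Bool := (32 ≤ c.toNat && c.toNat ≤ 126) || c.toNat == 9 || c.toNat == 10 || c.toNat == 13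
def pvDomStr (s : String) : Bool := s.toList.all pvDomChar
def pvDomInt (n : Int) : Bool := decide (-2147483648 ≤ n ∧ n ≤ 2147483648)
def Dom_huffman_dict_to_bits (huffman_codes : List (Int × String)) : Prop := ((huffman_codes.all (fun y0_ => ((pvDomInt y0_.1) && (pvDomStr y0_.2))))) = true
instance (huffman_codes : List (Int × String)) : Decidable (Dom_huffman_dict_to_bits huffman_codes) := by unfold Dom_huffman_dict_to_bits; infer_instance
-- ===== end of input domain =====

set_option maxRecDepth 8000


-- B replaces A's bit-by-bit byte accumulator by string-level chunking of the zero-padded code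
-- (objective: simpler); equivalence is about the return value only (neither mutates its argument).

-- ===== PORT A =====
-- shared helpers for the identical Python lines `bin(...)[2:].zfill(8)` in both programs:
-- bin(n)[2:] : binary digits via Nat.toDigits 2 (msb first, '0' for 0);
-- for n < 0, bin gives '-0b…' so [2:] keeps 'b' ++ digits of |n|
def pvBinSlice2 (n : Int) : List Char :=
  if n < 0 then 'b' :: Nat.toDigits 2 n.natAbs else Nat.toDigits 2 n.toNat

-- .zfill(8): left-pad with '0' to width 8 (exact here: bin(n)[2:] never starts with a sign)
def pvByte8 (n : Int) : String := String.ofList (List.replicate (8 - (pvBinSlice2 n).length) '0' ++ pvBinSlice2 n)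

-- int(bit) for a single char: exact on digit chars; Python raises ValueError otherwise (outside Pre_)
def pvIntOfDigit (c : Char) : Int := (c.toNat : Int) - 48

-- one step of A's inner `for bit in code` loop; state = (bitstream, current_byte, bit_count)
def pvInnerStep (s : List String × Int × Int) (c : Char) : List String × Int × Int :=
  let current_byte := Int.lor (s.2.1 <<< 1) (pvIntOfDigit c)
  let bit_count := s.2.2 + 1
  if bit_count = 8 then (s.1 ++ [pvByte8 current_byte], 0, 0) else (s.1, current_byte, bit_count)

-- A's body for one (symbol, code) pair: the two header bytes, the bit loop, then the flush
def pvSymStep (st : List String × Int × Int) (p : Int × String) : List String × Int × Int :=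
  let st := (st.1 ++ [pvByte8 p.1] ++ [pvByte8 (PySem.Str.len p.2)], st.2)
  let st := p.2.toList.foldl pvInnerStep st
  if st.2.2 > 0 then (st.1 ++ [pvByte8 (st.2.1 <<< (8 - st.2.2))], 0, 0) else st

def huffman_dict_to_bits (huffman_codes : List (Int × String)) : List String :=
  (huffman_codes.foldl pvSymStep ([], 0, 0)).1

-- ===== PORT B =====
-- Source B's inner loop body: fold the slice padded[i:i+8] into its byte, then append its bin-string
def pvChunkStep (padded : List Char) (bs : List String) (i : Int) : List String :=
  bs ++ [pvByte8 ((PySem.List.slice padded (some i) (some (i + 8))).foldl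
      (fun byte c => Int.lor (byte <<< 1) (pvIntOfDigit c)) 0)]

def huffman_dict_to_bits_alt (huffman_codes : List (Int × String)) : List String :=
  huffman_codes.foldl (fun bs p =>
    let bs := bs ++ [pvByte8 p.1] ++ [pvByte8 (PySem.Str.len p.2)]
    let padded := p.2.toList ++ List.replicate (PySem.Int.mod (-(PySem.Str.len p.2)) 8).toNat '0'
    (PySem.List.pyRange 0 (padded.length) 8).foldl (pvChunkStep padded) bs) []

-- ===== PRECONDITION & SPEC =====
-- Pre_ excludes duplicate symbols (the argument is a Python dict, which collapses duplicate keys,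
-- so the association list would not reach A as written) and restricts codes to decimal-digit
-- characters: on any other character Python's int(bit) raises ValueError, so A does not return.
def Pre_huffman_dict_to_bits (huffman_codes : List (Int × String)) : Prop :=
  (huffman_codes.map Prod.fst).Nodup ∧
  (huffman_codes.all (fun p => p.2.toList.all (fun c => c.isDigit))) = true
instance (huffman_codes : List (Int × String)) : Decidable (Pre_huffman_dict_to_bits huffman_codes) := by
  unfold Pre_huffman_dict_to_bits; infer_instance

def pvWitness_huffman_dict_to_bits : (List (Int × String)) := [(65, "010"), (66, "1")]


def Spec_huffman_dict_to_bits (huffman_codes : List (Int × String)) (out : List String) : Prop := out = huffman_dict_to_bits_alt huffman_codes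
instance (huffman_codes : List (Int × String)) (out : List String) : Decidable (Spec_huffman_dict_to_bits huffman_codes out) := by unfold Spec_huffman_dict_to_bits; infer_instance

-- ===== CLAIM (what is proved, stated in full; the proofs are below) =====
def Claim_equal_huffman_dict_to_bits : Prop := ∀ (huffman_codes : List (Int × String)), Dom_huffman_dict_to_bits huffman_codes → Pre_huffman_dict_to_bits huffman_codes → Spec_huffman_dict_to_bits huffman_codes (huffman_dict_to_bits huffman_codes)


-- ===== LEMMAS AND PROOFS =====

-- the byte value of one chunk, exactly Source B's inner fold
def pvChunkVal (l : List Char) : Int :=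
  l.foldl (fun byte c => Int.lor (byte <<< 1) (pvIntOfDigit c)) 0

-- the intended byte stream of one code: bytes of the 8-char chunks, last chunk right-padded with '0'
def pvChunks (l : List Char) : List String :=
  if h : l = [] then []
  else pvByte8 (pvChunkVal (l.take 8 ++ List.replicate (8 - l.length) '0')) :: pvChunks (l.drop 8)
  termination_by l.length
  decreasing_by
    simp only [List.length_drop]
    have := List.length_pos_iff.mpr h
    omega

theorem pv_chunks_nil : pvChunks ([] : List Char) = [] := by
  rw [pvChunks]; simp

-- simulation of A's inner bit loop with the bitstream factored out
def pvSim (cb bc : Int) : List Char → List String × Int × Int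
  | [] => ([], cb, bc)
  | c :: cs =>
    if bc + 1 = 8 then
      let r := pvSim 0 0 cs
      (pvByte8 (Int.lor (cb <<< 1) (pvIntOfDigit c)) :: r.1, r.2)
    else pvSim (Int.lor (cb <<< 1) (pvIntOfDigit c)) (bc + 1) cs

-- A's inner loop followed by the flush, bitstream factored out
def pvFlushA (l : List Char) : List String × Int × Int :=
  let st := pvSim 0 0 l
  if st.2.2 > 0 then (st.1 ++ [pvByte8 (st.2.1 <<< (8 - st.2.2))], 0, 0) else st

theorem pv_foldl_sim (l : List Char) : ∀ (bs : List String) (cb bc : Int),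
    l.foldl pvInnerStep (bs, cb, bc) = (bs ++ (pvSim cb bc l).1, (pvSim cb bc l).2) := by
  induction l with
  | nil => intro bs cb bc; simp [pvSim]
  | cons c cs ih =>
    intro bs cb bc
    by_cases h8 : bc + 1 = 8
    · simp only [List.foldl_cons, pvInnerStep, pvSim, h8, if_pos]
      rw [ih]; simp
    · simp only [List.foldl_cons, pvInnerStep, pvSim, h8, if_false, reduceIte]
      rw [ih]

theorem pv_sim_append (l1 l2 : List Char) : ∀ (cb bc : Int),
    pvSim cb bc (l1 ++ l2) =
      ((pvSim cb bc l1).1 ++ (pvSim (pvSim cb bc l1).2.1 (pvSim cb bc l1).2.2 l2).1,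
       (pvSim (pvSim cb bc l1).2.1 (pvSim cb bc l1).2.2 l2).2) := by
  induction l1 with
  | nil => intro cb bc; simp [pvSim]
  | cons c cs ih =>
    intro cb bc
    by_cases h8 : bc + 1 = 8
    · simp only [List.cons_append, pvSim, h8, reduceIte]
      rw [ih]
    · simp only [List.cons_append, pvSim, h8, reduceIte]
      rw [ih]

-- a full 8-char chunk from a fresh state emits exactly its chunk byte and resets the state
theorem pv_sim_full (l : List Char) (hl : l.length = 8) :
    pvSim 0 0 l = ([pvByte8 (pvChunkVal l)], 0, 0) := by
  rcases l with _ | ⟨c1, _ | ⟨c2, _ | ⟨c3, _ | ⟨c4, _ | ⟨c5, _ | ⟨c6, _ | ⟨c7, _ | ⟨c8, _ | ⟨c9, t⟩⟩⟩⟩⟩⟩⟩⟩⟩ <;>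
    simp only [List.length_cons, List.length_nil] at hl <;> try omega
  simp [pvSim, pvChunkVal]

-- a partial run (never reaching 8 bits) just accumulates the fold
theorem pv_simGen (l : List Char) : ∀ (cb bc : Int), 0 ≤ bc → bc + l.length < 8 →
    pvSim cb bc l =
      ([], l.foldl (fun byte c => Int.lor (byte <<< 1) (pvIntOfDigit c)) cb, bc + l.length) := by
  induction l with
  | nil => intro cb bc _ _; simp [pvSim]
  | cons c cs ih =>
    intro cb bc h0 hlt
    have h8 : ¬ (bc + 1 = 8) := by
      have h := hlt
      simp only [List.length_cons] at h
      push_cast at h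
      omega
    have hlt' : (bc + 1) + (cs.length : Int) < 8 := by
      have h := hlt
      simp only [List.length_cons] at h
      push_cast at h ⊢
      omega
    simp only [pvSim, h8, reduceIte, List.foldl_cons, List.length_cons]
    rw [ih _ (bc + 1) (by omega) hlt']
    simp only [Prod.mk.injEq, true_and]
    push_cast
    ring

theorem pv_lor_zero (v : Int) : Int.lor v 0 = v := by
  cases v <;> simp [Int.lor, Nat.ldiff]

-- folding trailing '0' characters is a left shift
theorem pv_zero_steps (k : Nat) : ∀ (v : Int),
    (List.replicate k '0').foldl (fun byte c => Int.lor (byte <<< 1) (pvIntOfDigit c)) v =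
      v <<< ((k : Nat) : Int) := by
  induction k with
  | zero =>
    intro v
    simpa using (Int.shiftLeft_eq_mul_pow v 0).symm
  | succ k ih =>
    intro v
    rw [List.replicate_succ, List.foldl_cons]
    have hd : pvIntOfDigit '0' = 0 := rfl
    rw [hd, pv_lor_zero, ih (v <<< (1 : Int))]
    rw [show (1 : Int) = ((1 : Nat) : Int) from rfl,
        Int.shiftLeft_eq_mul_pow, Int.shiftLeft_eq_mul_pow, Int.shiftLeft_eq_mul_pow]
    push_cast; ring

theorem pv_chunkval_pad (l : List Char) (k : Nat) :
    pvChunkVal (l ++ List.replicate k '0') = (pvChunkVal l) <<< ((k : Nat) : Int) := by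
  simp only [pvChunkVal, List.foldl_append]
  exact pv_zero_steps k _

theorem pv_flush_chunks (n : Nat) : ∀ (l : List Char), l.length ≤ n →
    pvFlushA l = (pvChunks l, 0, 0) := by
  induction n with
  | zero =>
    intro l hl
    have : l = [] := List.eq_nil_of_length_eq_zero (by omega)
    subst this
    simp [pvFlushA, pvSim, pv_chunks_nil]
  | succ n ih =>
    intro l hl
    rcases Nat.lt_or_ge l.length 8 with hsmall | hbig
    · rcases Nat.eq_zero_or_pos l.length with h0 | hpos
      · have : l = [] := List.eq_nil_of_length_eq_zero h0
        subst this
        simp [pvFlushA, pvSim, pv_chunks_nil]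
      · have hsim := pv_simGen l 0 0 le_rfl (by push_cast; omega)
        have hne : l ≠ [] := by intro h; subst h; simp at hpos
        rw [pvFlushA, hsim]
        split_ifs with hcond
        · conv_rhs => rw [pvChunks]
          simp only [hne, reduceDIte]
          rw [List.take_of_length_le (by omega : l.length ≤ 8),
              List.drop_eq_nil_of_le (by omega : l.length ≤ 8), pv_chunks_nil,
              pv_chunkval_pad l (8 - l.length)]
          have hsh : ((8 - l.length : Nat) : Int) = 8 - ((0 : Int) + (l.length : Int)) := by
            push_cast; omega
          rw [hsh]
          simp [pvChunkVal]
        · exfalso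
          apply hcond
          push_cast
          omega
    · set t := l.take 8 with ht
      set d := l.drop 8 with hd
      have hlt : t.length = 8 := by simp [ht]; omega
      have hsimt := pv_sim_full t hlt
      have happ := pv_sim_append t d 0 0
      rw [hsimt] at happ
      have hsplit : l = t ++ d := (List.take_append_drop 8 l).symm
      have hstep : pvFlushA l = ((pvByte8 (pvChunkVal t)) :: (pvFlushA d).1, (pvFlushA d).2) := by
        rw [pvFlushA, pvFlushA]
        conv_lhs => rw [hsplit]
        rw [happ]
        by_cases hc : (pvSim 0 0 d).2.2 > 0 <;> simp [hc]
      rw [hstep, ih d (by simp [hd]; omega)]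
      conv_rhs => rw [pvChunks]
      have hne : l ≠ [] := by intro h; rw [h] at hbig; simp at hbig
      simp only [hne, reduceDIte]
      have hrep : List.replicate (8 - l.length) '0' = ([] : List Char) := by
        have : 8 - l.length = 0 := by omega
        simp [this]
      rw [hrep, ← ht, ← hd]
      simp

theorem pv_symStep (p : Int × String) (bs : List String) :
    pvSymStep (bs, 0, 0) p =
      (bs ++ [pvByte8 p.1] ++ [pvByte8 (PySem.Str.len p.2)] ++ pvChunks p.2.toList, 0, 0) := by
  have hf := pv_flush_chunks p.2.toList.length p.2.toList le_rfl
  simp only [pvSymStep]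
  rw [pv_foldl_sim]
  rw [pvFlushA] at hf
  rcases hsim : pvSim 0 0 p.2.toList with ⟨out, cb, bc⟩
  rw [hsim] at hf
  by_cases hcond : bc > 0
  · simp only [hcond, if_pos] at hf ⊢
    have h1 : out ++ [pvByte8 (cb <<< (8 - bc))] = pvChunks p.2.toList :=
      ((Prod.mk.injEq _ _ _ _).mp hf).1
    simp only [← h1]
    simp
  · simp only [hcond, if_false, reduceIte] at hf ⊢
    obtain ⟨h1, h2, h3⟩ : out = pvChunks p.2.toList ∧ cb = 0 ∧ bc = 0 := by
      simpa [Prod.ext_iff] using hf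
    subst h1; subst h2; subst h3
    simp

theorem pv_chunkLoop' (m : Nat) : ∀ (l : List Char) (bs : List String), l.length = 8 * m →
    (List.range m).foldl (fun bs k => pvChunkStep l bs ((8 * k : Nat) : Int)) bs = bs ++ pvChunks l := by
  induction m with
  | zero =>
    intro l bs hl
    have : l = [] := List.eq_nil_of_length_eq_zero (by omega)
    subst this
    simp [pv_chunks_nil]
  | succ m ih =>
    intro l bs hl
    rw [List.range_succ_eq_map, List.foldl_cons, List.foldl_map]
    have hfirst : pvChunkStep l bs ((8 * 0 : Nat) : Int) =
        bs ++ [pvByte8 (pvChunkVal (l.take 8))] := by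
      simp only [pvChunkStep, Nat.mul_zero, Nat.cast_zero]
      rw [PySem.List.slice_toNat l (by omega) (by omega)]
      simp [pvChunkVal]
    rw [hfirst]
    have hfun : ∀ (bs' : List String) (k : Nat),
        pvChunkStep l bs' ((8 * (Nat.succ k) : Nat) : Int) = pvChunkStep (l.drop 8) bs' ((8 * k : Nat) : Int) := by
      intro bs' k
      have h1 : ((8 * (Nat.succ k) : Nat) : Int) + 8 = (((8 * Nat.succ k) + 8 : Nat) : Int) := by push_cast; ring
      have h2 : ((8 * k : Nat) : Int) + 8 = (((8 * k) + 8 : Nat) : Int) := by push_cast; ring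
      have hsl : PySem.List.slice l (some ((8 * (Nat.succ k) : Nat) : Int)) (some (((8 * (Nat.succ k) : Nat) : Int) + 8)) =
          PySem.List.slice (l.drop 8) (some ((8 * k : Nat) : Int)) (some (((8 * k : Nat) : Int) + 8)) := by
        rw [h1, h2, PySem.List.slice_toNat l (Int.natCast_nonneg _) (Int.natCast_nonneg _),
            PySem.List.slice_toNat (l.drop 8) (Int.natCast_nonneg _) (Int.natCast_nonneg _)]
        simp only [Int.toNat_natCast, List.drop_drop]
        have e1 : 8 * Nat.succ k = 8 + 8 * k := by omega
        rw [e1]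
        congr 1
        omega
      simp only [pvChunkStep, hsl]
    have hcong : (List.range m).foldl (fun (x : List String) (y : Nat) => pvChunkStep l x ((8 * Nat.succ y : Nat) : Int))
          (bs ++ [pvByte8 (pvChunkVal (l.take 8))]) =
        (List.range m).foldl (fun (x : List String) (y : Nat) => pvChunkStep (l.drop 8) x ((8 * y : Nat) : Int))
          (bs ++ [pvByte8 (pvChunkVal (l.take 8))]) := by
      apply PySem.List.foldl_congr_mem
      intro a x _
      exact hfun a x
    rw [hcong, ih (l.drop 8) _ (by simp [hl]; omega)]
    conv_rhs => rw [pvChunks]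
    have hne : l ≠ [] := by intro h; rw [h] at hl; simp at hl
    simp only [hne, reduceDIte]
    have hrep : List.replicate (8 - l.length) '0' = ([] : List Char) := by
      have : 8 - l.length = 0 := by omega
      simp [this]
    rw [hrep]
    simp

theorem pv_chunkLoop (l : List Char) (bs : List String) (m : Nat) (hm : l.length = 8 * m) :
    (PySem.List.pyRange 0 (l.length) 8).foldl (pvChunkStep l) bs = bs ++ pvChunks l := by
  rw [PySem.List.pyRange_of_pos 0 (l.length) (by omega : (0:Int) < 8)]
  rcases Nat.eq_zero_or_pos m with h0 | hmpos
  · subst h0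
    have : l = [] := List.eq_nil_of_length_eq_zero (by omega)
    subst this
    simp [pv_chunks_nil]
  · have hpos : (0 : Int) < (l.length : Int) := by push_cast; omega
    simp only [hpos, if_pos]
    have hcount : ((((l.length : Nat) : Int) - 0 + 8 - 1) / 8).toNat = m := by
      have h1 : (((l.length : Nat) : Int) - 0 + 8 - 1) = (((8 * m + 7 : Nat)) : Int) := by rw [hm]; push_cast; ring
      have h2 : ((((8 * m + 7 : Nat)) : Int)) / ((8 : Int)) = (((8 * m + 7) / 8 : Nat) : Int) := by
        rw [show ((8:Int)) = (((8:Nat)) : Int) from rfl, Int.ofNat_ediv_ofNat]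
      rw [h1, h2, Int.toNat_natCast]
      omega
    rw [hcount, List.foldl_map]
    have hfn : ∀ (bs' : List String) (k : Nat),
        pvChunkStep l bs' (0 + 8 * (k : Int)) = pvChunkStep l bs' ((8 * k : Nat) : Int) := by
      intro bs' k
      congr 1
      push_cast
      ring
    have hcong : (List.range m).foldl (fun (x : List String) (y : Nat) => pvChunkStep l x (0 + 8 * (y : Int))) bs =
        (List.range m).foldl (fun (x : List String) (y : Nat) => pvChunkStep l x ((8 * y : Nat) : Int)) bs := by
      apply PySem.List.foldl_congr_mem
      intro a x _
      exact hfn a x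
    rw [hcong]
    exact pv_chunkLoop' m l bs hm

theorem pv_chunks_pad (n : Nat) : ∀ (l : List Char) (k : Nat), l.length ≤ n →
    (l.length + k) % 8 = 0 → k < 8 → pvChunks (l ++ List.replicate k '0') = pvChunks l := by
  induction n with
  | zero =>
    intro l k hl h8 hk
    have : l = [] := List.eq_nil_of_length_eq_zero (by omega)
    subst this
    have : k = 0 := by simp at h8; omega
    subst this
    simp
  | succ n ih =>
    intro l k hl h8 hk
    rcases Nat.eq_zero_or_pos l.length with h0 | hpos
    · have : l = [] := List.eq_nil_of_length_eq_zero h0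
      subst this
      have : k = 0 := by simp at h8; omega
      subst this
      simp
    · have hne : l ≠ [] := by intro h; subst h; simp at hpos
      have hne' : l ++ List.replicate k '0' ≠ [] := by simp [hne]
      rcases Nat.lt_or_ge l.length 8 with hsmall | hbig
      · -- one short block: l ++ pad has length exactly 8
        have hlen8 : l.length + k = 8 := by omega
        conv_lhs => rw [pvChunks]
        conv_rhs => rw [pvChunks]
        simp only [hne, hne', reduceDIte]
        rw [List.take_of_length_le (by simp; omega : (l ++ List.replicate k '0').length ≤ 8),
            List.drop_eq_nil_of_le (by simp; omega : (l ++ List.replicate k '0').length ≤ 8),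
            List.take_of_length_le (by omega : l.length ≤ 8),
            List.drop_eq_nil_of_le (by omega : l.length ≤ 8),
            pv_chunks_nil]
        have e1 : (8 - (l ++ List.replicate k '0').length) = 0 := by simp; omega
        have e2 : (8 - l.length) = k := by omega
        rw [e1, e2]
        simp
      · -- full leading block on both sides
        conv_lhs => rw [pvChunks]
        conv_rhs => rw [pvChunks]
        simp only [hne, hne', reduceDIte]
        have ht1 : (l ++ List.replicate k '0').take 8 = l.take 8 :=
          List.take_append_of_le_length (by omega)
        have hd1 : (l ++ List.replicate k '0').drop 8 = l.drop 8 ++ List.replicate k '0' :=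
          List.drop_append_of_le_length (by omega)
        have hr1 : List.replicate (8 - (l ++ List.replicate k '0').length) '0' = ([] : List Char) := by
          have h0 : 8 - (l ++ List.replicate k '0').length = 0 := by simp; omega
          rw [h0, List.replicate_zero]
        have hr2 : List.replicate (8 - l.length) '0' = ([] : List Char) := by
          have : 8 - l.length = 0 := by omega
          simp [this]
        rw [ht1, hd1, hr1, hr2]
        congr 1
        exact ih (l.drop 8) k (by simp; omega) (by simp; omega) hk

theorem pv_main (hc : List (Int × String)) : ∀ (bs : List String),
    hc.foldl pvSymStep (bs, 0, 0) =
      (hc.foldl (fun bs p =>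
        let bs := bs ++ [pvByte8 p.1] ++ [pvByte8 (PySem.Str.len p.2)]
        let padded := p.2.toList ++ List.replicate (PySem.Int.mod (-(PySem.Str.len p.2)) 8).toNat '0'
        (PySem.List.pyRange 0 (padded.length) 8).foldl (pvChunkStep padded) bs) bs, 0, 0) := by
  induction hc with
  | nil => intro bs; simp
  | cons p t ih =>
    intro bs
    rw [List.foldl_cons, List.foldl_cons, pv_symStep p bs]
    set L := p.2.toList.length with hL
    have hlen : PySem.Str.len p.2 = (L : Int) := by rw [PySem.Str.len_eq]
    set r : Int := PySem.Int.mod (-(PySem.Str.len p.2)) 8 with hr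
    have hremod : r = (-(L : Int)) % 8 := by rw [hr, hlen, PySem.Int.mod_eq_emod_of_pos (by omega)]
    have hr0 : 0 ≤ r := by rw [hremod]; exact Int.emod_nonneg _ (by omega)
    have hr8 : r < 8 := by rw [hremod]; exact Int.emod_lt_of_pos _ (by omega)
    have hdvd : (8 : Int) ∣ (-(L : Int)) - r := by
      refine ⟨(-(L : Int)) / 8, ?_⟩
      have h := Int.emod_add_mul_ediv (-(L : Int)) 8
      rw [hremod]
      omega
    have hdvd8 : (L + r.toNat) % 8 = 0 := by omega
    set padded := p.2.toList ++ List.replicate r.toNat '0' with hpadded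
    have hplen : padded.length = L + r.toNat := by simp [hpadded, hL]
    have hm : padded.length = 8 * ((L + r.toNat) / 8) := by omega
    have hloop := pv_chunkLoop padded (bs ++ [pvByte8 p.1] ++ [pvByte8 (PySem.Str.len p.2)]) _ hm
    have hpad := pv_chunks_pad p.2.toList.length p.2.toList r.toNat le_rfl (by omega) (by omega)
    rw [ih]
    simp only
    rw [hloop, hpad]

-- ===== VERDICT (by name: the statement is the Claim_ definition above) =====
theorem huffman_dict_to_bits_spec : Claim_equal_huffman_dict_to_bits := by
  intro hc hdom hpre
  unfold Spec_huffman_dict_to_bits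
  unfold huffman_dict_to_bits huffman_dict_to_bits_alt
  rw [pv_main hc []]
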